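-- pv_equiv track=rewrite | github.com/helpingstar/algorithmstudy | python/Unsolved_Problem/BOJ_1029.py | solution
-- ===== SOURCE A (Python) =====
-- def solution(n, board):
--     M = [[[0] * 10 for j in range(1 << n)] for i in range(n)] # M[artist][path(bin)][price]
--
--     def dfs(artist, path, price):
--         if M[artist][path][price] != 0: # 메모제이션 적용
--             return M[artist][path][price]
--
--         count = 0 # 현재 artist 부터의 최대 거래 횟수
--         for nextA in range(1, n):
--             if board[artist][nextA] < price or path & (1 << nextA) > 0:
--                 continue
--             count = max(count, 1 + dfs(nextA, path | (1 << nextA), board[artist][nextA]))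
--         M[artist][path][price] = count # 메모!
--
--         return count
--
--     return 1 + dfs(0, 1, 0)
-- ===== SOURCE B (Python) =====
-- def solution(n, board):
--     # iterative bottom-up DP over the same (artist, path, price) state space;
--     # masks are swept in DESCENDING numeric order, so every successor state
--     # mask | (1 << na) (numerically greater) is already filled when read.
--     table = [[[0] * 10 for _ in range(1 << n)] for _ in range(n)]
--     for mask in range((1 << n) - 1, -1, -1):
--         for a in range(n):
--             for price in range(10):
--                 table[a][mask][price] = _best(n, board, table, mask, a, price)
--     return 1 + table[0][1][0]
--
--
-- def _best(n, board, table, mask, a, price):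
--     best = 0
--     for na in range(1, n):
--         v = board[a][na]
--         if v >= price and not (mask >> na) & 1:
--             c = 1 + table[na][mask | (1 << na)][v]
--             if c > best:
--                 best = c
--     return best
-- ===== Notes on version B (the rewrite author's own statement) =====
-- stated objective: alternative
-- what changed: replaces the top-down memoized DFS recursion with an iterative bottom-up sweep that fills the whole (artist, mask, price) table in descending numeric mask order, so every successor state is already computed when read
-- outside the precondition, e.g. on solution(3, [[0, -1, -1], [0, 0, 10], [0, 0, 0]]): A returns 1, B raises IndexError; on solution(2, [[0, -1], [5]]): A returns 1, B raises IndexError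
import Mathlib
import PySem

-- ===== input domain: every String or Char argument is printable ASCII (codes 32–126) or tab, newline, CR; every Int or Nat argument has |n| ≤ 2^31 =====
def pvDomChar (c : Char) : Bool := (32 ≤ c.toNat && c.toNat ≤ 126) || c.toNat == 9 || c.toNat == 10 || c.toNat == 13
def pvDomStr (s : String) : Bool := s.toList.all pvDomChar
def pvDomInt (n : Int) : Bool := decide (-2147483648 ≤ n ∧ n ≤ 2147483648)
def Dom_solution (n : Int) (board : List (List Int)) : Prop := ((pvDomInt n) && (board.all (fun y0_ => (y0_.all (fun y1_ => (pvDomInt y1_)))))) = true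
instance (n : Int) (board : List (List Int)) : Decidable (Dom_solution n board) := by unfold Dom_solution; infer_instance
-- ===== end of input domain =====

-- B replaces A's top-down memoized DFS recursion by an iterative bottom-up sweep of the
-- same (artist, path, price) table in descending numeric mask order (objective: alternative).

-- ===== PORT A =====
-- board[i][j]; every index A uses is in range under Pre_solution, so this is exact there
def pvBget (board : List (List Int)) (i j : Nat) : Int := (board.getD i []).getD j 0

-- A's memo M (nested lists, 0-initialised) is ported as a total map with default 0; under
-- Pre_solution every index A uses is in range, so this is exact.  The fuel argument is
-- only a totality guard: it starts at n and is proved never to run out under Pre_solution.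
def solutionDfs (board : List (List Int)) (nN : Nat) :
    Nat → Nat → Nat → Int → (Nat → Nat → Int → Int) → Int × (Nat → Nat → Int → Int)
  | 0, _, _, _, M => (0, M)
  | fuel+1, artist, path, price, M =>
    if M artist path price ≠ 0 then (M artist path price, M)
    else
      let st := (List.range' 1 (nN - 1)).foldl
        (fun (st : Int × (Nat → Nat → Int → Int)) nextA =>
          if pvBget board artist nextA < price ∨ path &&& (1 <<< nextA) > 0 then st
          else
            let r := solutionDfs board nN fuel nextA (path ||| (1 <<< nextA))
                       (pvBget board artist nextA) st.2
            (max st.1 (1 + r.1), r.2))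
        (0, M)
      (st.1, fun a p pr => if a = artist ∧ p = path ∧ pr = price then st.1 else st.2 a p pr)

def solution (n : Int) (board : List (List Int)) : Int :=
  1 + (solutionDfs board n.toNat n.toNat 0 1 0 (fun _ _ _ => 0)).1

-- ===== PORT B =====
-- B's table (nested lists, 0-initialised) is likewise ported as a total map with default 0,
-- wrapped in a structure so the built table is a plain value.
structure PvTab where
  app : Nat → Nat → Int → Int

def pvTupd (t : PvTab) (a m : Nat) (pr v : Int) : PvTab :=
  ⟨fun a' m' pr' => if a' = a ∧ m' = m ∧ pr' = pr then v else t.app a' m' pr'⟩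

-- Source B's helper _best
def pvBest (nN : Nat) (board : List (List Int)) (t : PvTab)
    (mask a : Nat) (price : Int) : Int :=
  (List.range' 1 (nN - 1)).foldl
    (fun best na =>
      let v := pvBget board a na
      if price ≤ v ∧ (mask >>> na) &&& 1 = 0 then
        let c := 1 + t.app na (mask ||| (1 <<< na)) v
        if best < c then c else best
      else best) 0

-- body of Source B's 'for a in range(n): for price in range(10): …' at one mask
def pvMaskStep (board : List (List Int)) (nN mask : Nat)
    (t : PvTab) : PvTab :=
  (List.range nN).foldl
    (fun t a =>
      (List.range 10).foldl
        (fun t (pr : Nat) => pvTupd t a mask (pr : Int) (pvBest nN board t mask a (pr : Int))) t) t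

def solution_alt (n : Int) (board : List (List Int)) : Int :=
  let nN := n.toNat
  -- range((1 << n) - 1, -1, -1) is exactly the masks 2^n - 1, …, 0 in descending order
  let t := ((List.range (1 <<< nN)).reverse).foldl
    (fun t mask => pvMaskStep board nN mask t) ⟨fun _ _ _ => 0⟩
  1 + t.app 0 1 0

-- ===== PRECONDITION & SPEC =====
-- Pre_ admits the natural domain of BOJ 1029 (an n×n board of digit prices ≤ 9).  It also
-- excludes boards whose first n rows are shorter than n or hold an entry > 9 in columns
-- 1..n-1 even when A never reaches that cell and returns: A raises on such a cell whenever
-- it is reached, and B's exhaustive sweep reads every cell, so B itself raises there.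
def Pre_solution (n : Int) (board : List (List Int)) : Prop :=
  1 ≤ n ∧ n ≤ (board.length : Int) ∧
  ∀ i : Nat, i < n.toNat →
    (n ≤ ((board.getD i []).length : Int) ∧
     ∀ j : Nat, j < n.toNat → 1 ≤ j → (board.getD i []).getD j 0 ≤ 9)
instance (n : Int) (board : List (List Int)) : Decidable (Pre_solution n board) := by
  unfold Pre_solution; infer_instance

def pvWitness_solution : Int × List (List Int) := (2, [[1, 2], [3, 4]])

def Spec_solution (n : Int) (board : List (List Int)) (out : Int) : Prop := out = solution_alt n board
instance (n : Int) (board : List (List Int)) (out : Int) : Decidable (Spec_solution n board out) := by unfold Spec_solution; infer_instance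

-- ===== CLAIM (what is proved, stated in full; the proofs are below) =====
def Claim_equal_solution : Prop := ∀ (n : Int) (board : List (List Int)), Dom_solution n board → Pre_solution n board → Spec_solution n board (solution n board)

-- ===== LEMMAS AND PROOFS =====

-- number of artists still free: bits 1..n-1 not yet on the path
def pvFree (nN p : Nat) : Nat :=
  (List.range' 1 (nN - 1)).countP (fun i => p &&& (1 <<< i) == 0)

-- the common mathematical value both ports compute: a pure fuel-indexed recursion
def pvV (board : List (List Int)) (nN : Nat) : Nat → Nat → Nat → Int → Int
  | 0, _, _, _ => 0
  | fuel+1, artist, path, price =>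
    (List.range' 1 (nN - 1)).foldl
      (fun count nextA =>
        if pvBget board artist nextA < price ∨ path &&& (1 <<< nextA) > 0 then count
        else max count (1 + pvV board nN fuel nextA (path ||| (1 <<< nextA))
                              (pvBget board artist nextA)))
      0

lemma pvAnd_pow_iff (p i : Nat) : p &&& (1 <<< i) = 0 ↔ p.testBit i = false := by
  rw [Nat.one_shiftLeft, Nat.and_two_pow]; cases h : p.testBit i <;> simp

lemma pvShift_iff (p i : Nat) : (p >>> i) &&& 1 = 0 ↔ p.testBit i = false := by
  simp [Nat.testBit]

lemma pvCountP_sub (q q' : Nat → Bool) (na : Nat) :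
    ∀ l : List Nat, l.Nodup → na ∈ l → q na = true → q' na = false →
      (∀ i, i ≠ na → q' i = q i) → l.countP q' + 1 = l.countP q := by
  intro l
  induction l with
  | nil => intro _ h; simp at h
  | cons x t ih =>
    intro hnd hmem hq hq' hagree
    rcases List.mem_cons.mp hmem with hx | hx
    · subst hx
      have hnt : na ∉ t := (List.nodup_cons.mp hnd).1
      have ht : t.countP q' = t.countP q := by
        apply List.countP_congr
        intro i hi
        rw [hagree i (fun he => hnt (he ▸ hi))]
      simp [hq, hq', ht]
    · have hxne : x ≠ na := by
        rintro rfl; exact (List.nodup_cons.mp hnd).1 hx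
      have := ih (List.nodup_cons.mp hnd).2 hx hq hq' hagree
      simp only [List.countP_cons, hagree x hxne]
      omega

lemma pvFree_or (nN p na : Nat) (hna : na ∈ List.range' 1 (nN - 1))
    (h : p &&& (1 <<< na) = 0) :
    pvFree nN (p ||| (1 <<< na)) + 1 = pvFree nN p := by
  apply pvCountP_sub _ _ na _ List.nodup_range' hna
  · simp [h]
  · rw [beq_eq_false_iff_ne]
    simp [Nat.one_shiftLeft, Nat.and_two_pow, Nat.testBit_or, Nat.testBit_two_pow_self]
  · intro i hi
    apply Bool.eq_iff_iff.mpr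
    simp only [beq_iff_eq, pvAnd_pow_iff, Nat.testBit_or]
    rw [Nat.one_shiftLeft, Nat.testBit_two_pow_of_ne (fun he => hi he.symm)]
    simp

lemma pvFree_zero (nN p na : Nat) (h : pvFree nN p = 0)
    (hna : na ∈ List.range' 1 (nN - 1)) : ¬ p &&& (1 <<< na) = 0 := by
  have := List.countP_eq_zero.mp h na hna
  simpa using this

lemma pvOr_ne (p na : Nat) (h : p &&& (1 <<< na) = 0) : p ||| (1 <<< na) ≠ p := by
  intro he
  have := congrArg (fun x => x.testBit na) he
  simp [Nat.testBit_or, Nat.one_shiftLeft, (pvAnd_pow_iff p na).mp h] at this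

lemma pvFoldl_id {α β : Type} (l : List α) (f : β → α → β) (st : β)
    (h : ∀ st x, x ∈ l → f st x = st) : l.foldl f st = st := by
  induction l generalizing st with
  | nil => rfl
  | cons x t ih =>
    simp only [List.foldl_cons, h st x List.mem_cons_self]
    exact ih st (fun s y hy => h s y (List.mem_cons_of_mem _ hy))

def pvGood (board : List (List Int)) (nN : Nat) (M : Nat → Nat → Int → Int) : Prop :=
  ∀ a p pr, M a p pr ≠ 0 → M a p pr = pvV board nN (pvFree nN p) a p pr

lemma pvGood_write (board : List (List Int)) (nN : Nat) (M : Nat → Nat → Int → Int)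
    (a p : Nat) (pr c : Int) (hc : c = pvV board nN (pvFree nN p) a p pr)
    (hM : pvGood board nN M) :
    pvGood board nN (fun a' p' pr' => if a' = a ∧ p' = p ∧ pr' = pr then c else M a' p' pr') := by
  intro a' p' pr' hne
  by_cases hk : a' = a ∧ p' = p ∧ pr' = pr
  · obtain ⟨rfl, rfl, rfl⟩ := hk
    simpa using hc
  · simp only [if_neg hk] at hne ⊢
    exact hM a' p' pr' hne

lemma pvDfs_fold (board : List (List Int)) (nN fuel a p : Nat) (pr : Int) (k : Nat)
    (hk : pvFree nN p = k + 1) (hfk : k + 1 ≤ fuel)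
    (ih : ∀ a' p' pr' M', pvGood board nN M' → pvFree nN p' < fuel →
      (solutionDfs board nN fuel a' p' pr' M').1 = pvV board nN (pvFree nN p') a' p' pr' ∧
      pvGood board nN (solutionDfs board nN fuel a' p' pr' M').2) :
    ∀ (l : List Nat), (∀ x ∈ l, x ∈ List.range' 1 (nN - 1)) → ∀ (c : Int) M, pvGood board nN M →
      (l.foldl
        (fun (st : Int × (Nat → Nat → Int → Int)) nextA =>
          if pvBget board a nextA < pr ∨ p &&& (1 <<< nextA) > 0 then st
          else
            let r := solutionDfs board nN fuel nextA (p ||| (1 <<< nextA))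
                       (pvBget board a nextA) st.2
            (max st.1 (1 + r.1), r.2))
        (c, M)).1
        = l.foldl
            (fun count nextA =>
              if pvBget board a nextA < pr ∨ p &&& (1 <<< nextA) > 0 then count
              else max count (1 + pvV board nN k nextA (p ||| (1 <<< nextA))
                                    (pvBget board a nextA)))
            c ∧
      pvGood board nN
        (l.foldl
          (fun (st : Int × (Nat → Nat → Int → Int)) nextA =>
            if pvBget board a nextA < pr ∨ p &&& (1 <<< nextA) > 0 then st
            else
              let r := solutionDfs board nN fuel nextA (p ||| (1 <<< nextA))
                         (pvBget board a nextA) st.2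
              (max st.1 (1 + r.1), r.2))
          (c, M)).2 := by
  intro l
  induction l with
  | nil => exact fun _ c M hM => ⟨rfl, hM⟩
  | cons x t iht =>
    intro hsub c M hM
    by_cases hg : pvBget board a x < pr ∨ p &&& (1 <<< x) > 0
    · simp only [List.foldl_cons, if_pos hg]
      exact iht (fun y hy => hsub y (List.mem_cons_of_mem _ hy)) c M hM
    · have hbit : p &&& (1 <<< x) = 0 := by
        rcases Nat.eq_zero_or_pos (p &&& (1 <<< x)) with h0 | h0
        · exact h0
        · exact absurd (Or.inr h0) hg
      have hx : x ∈ List.range' 1 (nN - 1) := hsub x List.mem_cons_self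
      have hfree : pvFree nN (p ||| (1 <<< x)) = k := by
        have := pvFree_or nN p x hx hbit; omega
      have hrec := ih x (p ||| (1 <<< x)) (pvBget board a x) M hM (by rw [hfree]; omega)
      simp only [List.foldl_cons, if_neg hg]
      rw [hrec.1, hfree]
      exact iht (fun y hy => hsub y (List.mem_cons_of_mem _ hy)) _ _ hrec.2

lemma pvDfs_correct (board : List (List Int)) (nN : Nat) :
    ∀ fuel a p pr M, pvGood board nN M → pvFree nN p < fuel →
      (solutionDfs board nN fuel a p pr M).1 = pvV board nN (pvFree nN p) a p pr ∧
      pvGood board nN (solutionDfs board nN fuel a p pr M).2 := by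
  intro fuel
  induction fuel with
  | zero => intro a p pr M hM hf; omega
  | succ fuel ih =>
    intro a p pr M hM hf
    by_cases hmem : M a p pr ≠ 0
    · simp only [solutionDfs, if_pos hmem]
      exact ⟨hM a p pr hmem, hM⟩
    · simp only [solutionDfs, if_neg hmem]
      cases hk : pvFree nN p with
      | zero =>
        have hid : (List.range' 1 (nN - 1)).foldl
            (fun (st : Int × (Nat → Nat → Int → Int)) nextA =>
              if pvBget board a nextA < pr ∨ p &&& (1 <<< nextA) > 0 then st
              else
                let r := solutionDfs board nN fuel nextA (p ||| (1 <<< nextA))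
                           (pvBget board a nextA) st.2
                (max st.1 (1 + r.1), r.2))
            (0, M) = (0, M) := by
          apply pvFoldl_id
          intro st x hxm
          have := pvFree_zero nN p x hk hxm
          have hpos : p &&& (1 <<< x) > 0 := Nat.pos_of_ne_zero this
          simp [hpos]
        rw [hid]
        refine ⟨by simp [pvV], ?_⟩
        exact pvGood_write board nN M a p pr 0 (by rw [hk]; rfl) hM
      | succ k =>
        have hfold := pvDfs_fold board nN (fuel) a p pr k hk (by omega) ih
          (List.range' 1 (nN - 1)) (fun y hy => hy) 0 M hM
        refine ⟨?_, ?_⟩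
        · rw [hfold.1]; simp [pvV]
        · exact pvGood_write board nN _ a p pr _ (by rw [hk, hfold.1]; simp [pvV]) hfold.2

def pvTgood (board : List (List Int)) (nN k : Nat) (t : PvTab) : Prop :=
  ∀ a m (pr : Int), a < nN → k ≤ m → m < 2 ^ nN → 0 ≤ pr → pr < 10 →
    t.app a m pr = pvV board nN (pvFree nN m) a m pr

def pvHb (board : List (List Int)) (nN : Nat) : Prop :=
  ∀ i j : Nat, i < nN → 1 ≤ j → j < nN → pvBget board i j ≤ 9

lemma pvMem_lt (nN na : Nat) (h : na ∈ List.range' 1 (nN - 1)) : 1 ≤ na ∧ na < nN := by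
  have := List.mem_range'_1.mp h; omega

lemma pvOr_lt (nN mask na : Nat) (hm : mask < 2 ^ nN) (hna : na < nN) :
    mask ||| (1 <<< na) < 2 ^ nN := by
  apply Nat.or_lt_two_pow hm
  rw [Nat.one_shiftLeft]
  exact Nat.pow_lt_pow_right one_lt_two hna

lemma pvOr_gt (mask na : Nat) (h : mask &&& (1 <<< na) = 0) :
    mask + 1 ≤ mask ||| (1 <<< na) := by
  have h1 : mask ≤ mask ||| (1 <<< na) := Nat.left_le_or
  have h2 := pvOr_ne mask na h
  omega

lemma pvBest_correct (board : List (List Int)) (nN : Nat) (hb : pvHb board nN)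
    (mask a : Nat) (pr : Int) (ha : a < nN) (hpr : 0 ≤ pr)
    (t : PvTab)
    (hread : ∀ na v, na ∈ List.range' 1 (nN - 1) → mask &&& (1 <<< na) = 0 →
      0 ≤ v → v ≤ 9 →
      t.app na (mask ||| (1 <<< na)) v
        = pvV board nN (pvFree nN (mask ||| (1 <<< na))) na (mask ||| (1 <<< na)) v) :
    pvBest nN board t mask a pr = pvV board nN (pvFree nN mask) a mask pr := by
  cases hk : pvFree nN mask with
  | zero =>
    have hid : pvBest nN board t mask a pr = 0 := by
      apply pvFoldl_id
      intro st x hxm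
      have hbit := pvFree_zero nN mask x hk hxm
      have hno : ¬ (mask >>> x) &&& 1 = 0 := fun hc =>
        hbit ((pvAnd_pow_iff mask x).mpr ((pvShift_iff mask x).mp hc))
      simp only [if_neg (show ¬(pr ≤ pvBget board a x ∧ (mask >>> x) &&& 1 = 0) from
        fun hc => hno hc.2)]
    rw [hid]; simp [pvV]
  | succ k =>
    show (List.range' 1 (nN - 1)).foldl _ 0 = _
    rw [show pvV board nN (k+1) a mask pr
        = (List.range' 1 (nN - 1)).foldl
            (fun count nextA =>
              if pvBget board a nextA < pr ∨ mask &&& (1 <<< nextA) > 0 then count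
              else max count (1 + pvV board nN k nextA (mask ||| (1 <<< nextA))
                                    (pvBget board a nextA)))
            0 from by simp [pvV]]
    apply PySem.List.foldl_congr_mem
    intro acc x hx
    by_cases hbit : mask &&& (1 <<< x) = 0
    · have hsh : (mask >>> x) &&& 1 = 0 :=
        (pvShift_iff mask x).mpr ((pvAnd_pow_iff mask x).mp hbit)
      by_cases hv : pr ≤ pvBget board a x
      · have hx' := pvMem_lt nN x hx
        have h9 : pvBget board a x ≤ 9 := hb a x ha hx'.1 hx'.2
        have h0 : (0:Int) ≤ pvBget board a x := le_trans hpr hv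
        have hfree : pvFree nN (mask ||| (1 <<< x)) = k := by
          have := pvFree_or nN mask x hx hbit; omega
        have hrd := hread x (pvBget board a x) hx hbit h0 h9
        simp only [if_pos (And.intro hv hsh), if_neg
          (show ¬(pvBget board a x < pr ∨ mask &&& (1 <<< x) > 0) from fun hc =>
            hc.elim (fun h1 => (not_le.mpr h1) hv) (fun h2 => by omega))]
        rw [hrd, hfree]
        split_ifs with h
        · exact (max_eq_right h.le).symm
        · exact (max_eq_left (not_lt.mp h)).symm
      · have : ¬ (pr ≤ pvBget board a x ∧ (mask >>> x) &&& 1 = 0) := fun hc => hv hc.1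
        simp only [if_neg this, if_pos (Or.inl (not_le.mp hv))]
    · have hpos : mask &&& (1 <<< x) > 0 := Nat.pos_of_ne_zero hbit
      have : ¬ (pr ≤ pvBget board a x ∧ (mask >>> x) &&& 1 = 0) := by
        rintro ⟨-, hc⟩
        exact hbit ((pvAnd_pow_iff mask x).mpr ((pvShift_iff mask x).mp hc))
      simp only [if_neg this, if_pos (Or.inr hpos)]

lemma pvTupd_app (t : PvTab) (a m : Nat) (pr v : Int) (a' m' : Nat) (pr' : Int) :
    (pvTupd t a m pr v).app a' m' pr'
      = if a' = a ∧ m' = m ∧ pr' = pr then v else t.app a' m' pr' := rfl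

lemma pvPrFold (board : List (List Int)) (nN : Nat) (hb : pvHb board nN)
    (mask a : Nat) (ha : a < nN)
    (t0 : PvTab)
    (hread0 : ∀ na v, na ∈ List.range' 1 (nN - 1) → mask &&& (1 <<< na) = 0 →
      0 ≤ v → v ≤ 9 →
      t0.app na (mask ||| (1 <<< na)) v
        = pvV board nN (pvFree nN (mask ||| (1 <<< na))) na (mask ||| (1 <<< na)) v) :
    ∀ (l : List Nat) (t : PvTab),
      (∀ a' m pr', m ≠ mask → t.app a' m pr' = t0.app a' m pr') →
      (∀ a' m pr', m ≠ mask →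
        (l.foldl (fun t (pr : Nat) => pvTupd t a mask (pr : Int) (pvBest nN board t mask a (pr : Int))) t).app a' m pr'
          = t0.app a' m pr') ∧
      (∀ a' pr', a' ≠ a →
        (l.foldl (fun t (pr : Nat) => pvTupd t a mask (pr : Int) (pvBest nN board t mask a (pr : Int))) t).app a' mask pr'
          = t.app a' mask pr') ∧
      (∀ pr' : Int, (∃ j ∈ l, pr' = (j : Int)) →
        (l.foldl (fun t (pr : Nat) => pvTupd t a mask (pr : Int) (pvBest nN board t mask a (pr : Int))) t).app a mask pr'
          = pvV board nN (pvFree nN mask) a mask pr') ∧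
      (∀ pr' : Int, (∀ j ∈ l, pr' ≠ (j : Int)) →
        (l.foldl (fun t (pr : Nat) => pvTupd t a mask (pr : Int) (pvBest nN board t mask a (pr : Int))) t).app a mask pr'
          = t.app a mask pr') := by
  intro l
  induction l with
  | nil =>
    intro t hTm
    exact ⟨fun a' m pr' h => hTm a' m pr' h, fun _ _ _ => rfl,
      fun pr' h => by simp at h, fun _ _ => rfl⟩
  | cons j s ihs =>
    intro t hTm
    have hread : ∀ na v, na ∈ List.range' 1 (nN - 1) → mask &&& (1 <<< na) = 0 →
        0 ≤ v → v ≤ 9 →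
        t.app na (mask ||| (1 <<< na)) v
          = pvV board nN (pvFree nN (mask ||| (1 <<< na))) na (mask ||| (1 <<< na)) v := by
      intro na v hna hbit h0 h9
      rw [hTm na _ v (by have := pvOr_gt mask na hbit; omega)]
      exact hread0 na v hna hbit h0 h9
    have hbest : pvBest nN board t mask a (j : Int)
        = pvV board nN (pvFree nN mask) a mask (j : Int) :=
      pvBest_correct board nN hb mask a (j : Int) ha (by positivity) t hread
    have hTm1 : ∀ a' m pr', m ≠ mask →
        (pvTupd t a mask (j : Int) (pvBest nN board t mask a (j : Int))).app a' m pr' = t0.app a' m pr' := by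
      intro a' m pr' h
      rw [pvTupd_app]
      rw [if_neg (fun hc => h hc.2.1)]
      exact hTm a' m pr' h
    obtain ⟨Q1, Q2, Q3, Q4⟩ := ihs (pvTupd t a mask (j : Int) (pvBest nN board t mask a (j : Int))) hTm1
    rw [List.foldl_cons]
    refine ⟨Q1, ?_, ?_, ?_⟩
    · intro a' pr' hne
      rw [Q2 a' pr' hne]
      rw [pvTupd_app]
      rw [if_neg (fun hc => hne hc.1)]
    · intro pr' hex
      by_cases hs : ∃ j' ∈ s, pr' = (j' : Int)
      · exact Q3 pr' hs
      · obtain ⟨j'', hj'', he⟩ := hex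
        have hj : pr' = (j : Int) := by
          rcases List.mem_cons.mp hj'' with h | h
          · exact h ▸ he
          · exact absurd ⟨j'', h, he⟩ hs
        rw [Q4 pr' (fun j' hj' hc => hs ⟨j', hj', hc⟩)]
        rw [pvTupd_app]
        rw [if_pos ⟨rfl, rfl, hj⟩, hj, hbest]
    · intro pr' hall
      rw [Q4 pr' (fun j' hj' => hall j' (List.mem_cons_of_mem _ hj'))]
      rw [pvTupd_app]
      rw [if_neg (fun hc => hall j List.mem_cons_self hc.2.2)]

lemma pvAFold (board : List (List Int)) (nN : Nat) (hb : pvHb board nN)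
    (mask : Nat)
    (t0 : PvTab)
    (hread0 : ∀ na v, na ∈ List.range' 1 (nN - 1) → mask &&& (1 <<< na) = 0 →
      0 ≤ v → v ≤ 9 →
      t0.app na (mask ||| (1 <<< na)) v
        = pvV board nN (pvFree nN (mask ||| (1 <<< na))) na (mask ||| (1 <<< na)) v) :
    ∀ (l : List Nat), l.Nodup → (∀ x ∈ l, x < nN) →
      ∀ (t : PvTab),
      (∀ a' m pr', m ≠ mask → t.app a' m pr' = t0.app a' m pr') →
      (∀ a' m pr', m ≠ mask →
        (l.foldl (fun t a =>
          (List.range 10).foldl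
            (fun t (pr : Nat) => pvTupd t a mask (pr : Int) (pvBest nN board t mask a (pr : Int))) t) t).app a' m pr'
          = t0.app a' m pr') ∧
      (∀ a' ∈ l, ∀ pr' : Int, 0 ≤ pr' → pr' < 10 →
        (l.foldl (fun t a =>
          (List.range 10).foldl
            (fun t (pr : Nat) => pvTupd t a mask (pr : Int) (pvBest nN board t mask a (pr : Int))) t) t).app a' mask pr'
          = pvV board nN (pvFree nN mask) a' mask pr') ∧
      (∀ a', a' ∉ l → ∀ pr' : Int,
        (l.foldl (fun t a =>
          (List.range 10).foldl
            (fun t (pr : Nat) => pvTupd t a mask (pr : Int) (pvBest nN board t mask a (pr : Int))) t) t).app a' mask pr'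
          = t.app a' mask pr') := by
  intro l
  induction l with
  | nil =>
    intro _ _ t hTm
    exact ⟨fun a' m pr' h => hTm a' m pr' h, fun a' h => by simp at h, fun _ _ _ => rfl⟩
  | cons x s ihs =>
    intro hnd hlt t hTm
    obtain ⟨P1, P2, P3, P4⟩ := pvPrFold board nN hb mask x (hlt x List.mem_cons_self) t0 hread0
      (List.range 10) t hTm
    obtain ⟨Q1, Q2, Q3⟩ := ihs (List.nodup_cons.mp hnd).2
      (fun y hy => hlt y (List.mem_cons_of_mem _ hy)) _ P1
    simp only [List.foldl_cons]
    refine ⟨Q1, ?_, ?_⟩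
    · intro a' ha' pr' h0 h10
      rcases List.mem_cons.mp ha' with h | h
      · subst h
        rw [Q3 a' (List.nodup_cons.mp hnd).1 pr']
        apply P3
        refine ⟨pr'.toNat, ?_, ?_⟩
        · rw [List.mem_range]; omega
        · omega
      · exact Q2 a' h pr' h0 h10
    · intro a' ha' pr'
      rw [Q3 a' (fun hc => ha' (List.mem_cons_of_mem _ hc)) pr']
      exact P2 a' pr' (fun hc => ha' (hc ▸ List.mem_cons_self))

def pvHread (board : List (List Int)) (nN mask : Nat) (t : PvTab) : Prop :=
  ∀ na v, na ∈ List.range' 1 (nN - 1) → mask &&& (1 <<< na) = 0 →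
      0 ≤ v → v ≤ 9 →
      t.app na (mask ||| (1 <<< na)) v
        = pvV board nN (pvFree nN (mask ||| (1 <<< na))) na (mask ||| (1 <<< na)) v

lemma pvMaskStep_correct (board : List (List Int)) (nN : Nat) (hb : pvHb board nN)
    (mask : Nat) (hm : mask < 2 ^ nN) (t : PvTab)
    (ht : pvTgood board nN (mask + 1) t) :
    pvTgood board nN mask (pvMaskStep board nN mask t) := by
  have hread0 : pvHread board nN mask t := by
    intro na v hna hbit h0 h9
    have hna' := pvMem_lt nN na hna
    exact ht na (mask ||| (1 <<< na)) v hna'.2 (pvOr_gt mask na hbit)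
      (pvOr_lt nN mask na hm hna'.2) h0 (by omega)
  obtain ⟨R1, R2, R3⟩ := pvAFold board nN hb mask t hread0
    (List.range nN) (List.nodup_range) (fun x hx => List.mem_range.mp hx) t (fun _ _ _ _ => rfl)
  intro a m pr ha hge hlt h0 h10
  by_cases hmm : m = mask
  · subst hmm
    exact R2 a (List.mem_range.mpr ha) pr h0 h10
  · unfold pvMaskStep
    rw [R1 a m pr hmm]
    exact ht a m pr ha (by omega) hlt h0 h10

lemma pvMaskFold (board : List (List Int)) (nN : Nat) (hb : pvHb board nN) :
    ∀ k (t : PvTab), k ≤ 2 ^ nN → pvTgood board nN k t →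
      pvTgood board nN 0
        (((List.range k).reverse).foldl (fun t mask => pvMaskStep board nN mask t) t) := by
  intro k
  induction k with
  | zero =>
    intro t _ ht
    simpa using ht
  | succ k ihk =>
    intro t hk ht
    rw [show (List.range (k+1)).reverse = k :: (List.range k).reverse by
      rw [List.range_succ, List.reverse_append]; rfl]
    simp only [List.foldl_cons]
    exact ihk (pvMaskStep board nN k t) (by omega)
      (pvMaskStep_correct board nN hb k (by omega) t
        (fun a m pr ha hge hlt h0 h10 => ht a m pr ha (by omega) hlt h0 h10))

lemma pvB_eq (n : Int) (board : List (List Int)) (hn : 1 ≤ n) (hb : pvHb board n.toNat) :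
    solution_alt n board = 1 + pvV board n.toNat (pvFree n.toNat 1) 0 1 0 := by
  have hnN : 1 ≤ n.toNat := by omega
  have hzero : pvTgood board n.toNat (2 ^ n.toNat) ⟨fun _ _ _ => (0:Int)⟩ := by
    intro a m pr ha hge hlt h0 h10; omega
  have hfin := pvMaskFold board n.toNat hb (2 ^ n.toNat) ⟨fun _ _ _ => 0⟩ le_rfl hzero
  show 1 + (((List.range (1 <<< n.toNat)).reverse).foldl
      (fun t mask => pvMaskStep board n.toNat mask t) ⟨fun _ _ _ => 0⟩).app 0 1 0 = _
  rw [Nat.one_shiftLeft]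
  rw [hfin 0 1 0 (by omega) (by omega) (Nat.one_lt_two_pow_iff.mpr (by omega)) le_rfl (by norm_num)]
  norm_num

lemma pvA_eq (n : Int) (board : List (List Int)) (hn : 1 ≤ n) :
    solution n board = 1 + pvV board n.toNat (pvFree n.toNat 1) 0 1 0 := by
  have h0 : pvGood board n.toNat (fun _ _ _ => 0) := fun a p pr h => absurd rfl h
  have hlt : pvFree n.toNat 1 < n.toNat := by
    have h1 := List.countP_le_length
      (l := List.range' 1 (n.toNat - 1)) (p := fun i => 1 &&& (1 <<< i) == 0)
    have h2 : (List.range' 1 (n.toNat - 1)).length = n.toNat - 1 := by simp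
    unfold pvFree
    omega
  show 1 + (solutionDfs board n.toNat n.toNat 0 1 0 (fun _ _ _ => 0)).1 = _
  rw [(pvDfs_correct board n.toNat n.toNat 0 1 0 (fun _ _ _ => 0) h0 hlt).1]

-- ===== VERDICT (by name: the statement is the Claim_ definition above) =====
theorem solution_spec : Claim_equal_solution := by
  intro n board _ hpre
  unfold Spec_solution
  obtain ⟨hn, -, hrows⟩ := hpre
  have hb : pvHb board n.toNat := by
    intro i j hi h1 hj
    exact (hrows i hi).2 j hj h1
  rw [pvA_eq n board hn, pvB_eq n board hn hb]
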